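-- pv_equiv track=rewrite | github.com/narae-kim/secret-santa | secretsanta/utils/validation.py | is_assignee_unique_and_not_themselves_in_pairs
-- ===== SOURCE A (Python) =====
-- def is_assignee_unique_and_not_themselves_in_pairs(santas, pairs: dict) -> bool:
--     """
--     Given the iterable ``santas``, validate the given ``pairs`` have random assignment to each other.
--     If the unique keys of ``pairs`` are same as ``santas`` and each key has a unique value, not themselves,
--     from ``santas``, then return True. Otherwise, return False.
--
--     :param santas: An iterable
--     :param pairs: { Secret Santa : Assignee } pairs that is under validation
--     """
--     if len(santas) != len(pairs):
--         return False
--     covered_members = set()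
--     for santa in santas:
--         try:
--             if pairs[santa] == santa or pairs[santa] not in santas:
--                 return False
--             covered_members.add(pairs[santa])
--         except KeyError:
--             return False
--     return len(covered_members) == len(santas)
-- ===== SOURCE B (Python) =====
-- def is_assignee_unique_and_not_themselves_in_pairs(santas, pairs: dict) -> bool:
--     if len(santas) != len(pairs):
--         return False
--     for santa in santas:
--         if santa not in pairs or pairs[santa] == santa:
--             return False
--     return sorted(pairs[santa] for santa in santas) == sorted(set(santas))
-- ===== Notes on version B (the rewrite author's own statement) =====
-- stated objective: alternative
-- what changed: Replaces A's single fused early-exit loop (maintaining a running covered set and scanning `santas` for membership on every element) with a guard pass (key present, no self-assignment) followed by a global multiset comparison sorted(assignees) == sorted(set(santas)), which subsumes A's membership scan and covered-set cardinality check.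
import Mathlib
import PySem

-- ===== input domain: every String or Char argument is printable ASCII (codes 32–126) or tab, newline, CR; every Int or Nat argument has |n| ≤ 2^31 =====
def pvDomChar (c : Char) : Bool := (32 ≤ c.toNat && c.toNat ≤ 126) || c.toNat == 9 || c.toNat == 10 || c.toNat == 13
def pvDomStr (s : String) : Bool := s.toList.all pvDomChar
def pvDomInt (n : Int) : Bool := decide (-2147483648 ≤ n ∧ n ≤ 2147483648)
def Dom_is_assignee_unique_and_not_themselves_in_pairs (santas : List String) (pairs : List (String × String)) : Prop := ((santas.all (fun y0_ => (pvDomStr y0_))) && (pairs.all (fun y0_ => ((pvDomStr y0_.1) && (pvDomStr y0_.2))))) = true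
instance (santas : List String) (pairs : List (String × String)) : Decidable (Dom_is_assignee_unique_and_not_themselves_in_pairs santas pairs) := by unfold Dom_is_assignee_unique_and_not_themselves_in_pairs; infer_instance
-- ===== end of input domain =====

-- B replaces A's fused early-exit loop (running covered set + per-element membership scan) by a
-- guard pass followed by a sorted-multiset comparison sorted(assignees) == sorted(set(santas));
-- objective: alternative algorithm.

-- ===== PORT A =====
-- A's for-loop with early returns: recursion over the remaining santas carrying the covered set.
def pvALoop (allSantas : List String) (d : PySem.Dict String String)
    (covered : PySem.Set String) : List String → Bool
  | [] => covered.length == allSantas.length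
  | s :: rest =>
    match d.get? s with
    | none => false            -- KeyError → return False
    | some a =>
      if a == s || !(allSantas.contains a) then false
      else pvALoop allSantas d (PySem.Set.add covered a) rest

def is_assignee_unique_and_not_themselves_in_pairs (santas : List String) (pairs : List (String × String)) : Bool :=
  let d := PySem.Dict.ofList pairs
  if santas.length != d.size then false
  else pvALoop santas d PySem.Set.empty santas

-- ===== PORT B =====
-- guard pass: for santa in santas: if santa not in pairs or pairs[santa] == santa: return False
def pvBGuard (d : PySem.Dict String String) : List String → Bool
  | [] => true
  | s :: rest =>
    match d.get? s with
    | none => false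
    | some a => if a == s then false else pvBGuard d rest

def is_assignee_unique_and_not_themselves_in_pairs_alt (santas : List String) (pairs : List (String × String)) : Bool :=
  let d := PySem.Dict.ofList pairs
  if santas.length != d.size then false
  else if !(pvBGuard d santas) then false
  else
    -- sorted(pairs[s] for s in santas) == sorted(set(santas)); the guard pass already
    -- established that every s ∈ santas is a key of d, so getD "" is exact here.
    PySem.List.sorted (santas.map (fun s => (d.get? s).getD "")) (fun x => x) false
      == PySem.List.sorted (PySem.Set.ofList santas) (fun x => x) false

-- ===== PRECONDITION & SPEC =====
def Spec_is_assignee_unique_and_not_themselves_in_pairs (santas : List String) (pairs : List (String × String)) (out : Bool) : Prop := out = is_assignee_unique_and_not_themselves_in_pairs_alt santas pairs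
instance (santas : List String) (pairs : List (String × String)) (out : Bool) : Decidable (Spec_is_assignee_unique_and_not_themselves_in_pairs santas pairs out) := by unfold Spec_is_assignee_unique_and_not_themselves_in_pairs; infer_instance

-- ===== CLAIM (what is proved, stated in full; the proofs are below) =====
def Claim_equal_is_assignee_unique_and_not_themselves_in_pairs : Prop := ∀ (santas : List String) (pairs : List (String × String)), Dom_is_assignee_unique_and_not_themselves_in_pairs santas pairs → Spec_is_assignee_unique_and_not_themselves_in_pairs santas pairs (is_assignee_unique_and_not_themselves_in_pairs santas pairs)

-- ===== LEMMAS AND PROOFS =====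

-- [pairs[s] for s in l], KeyError → none (proof-side description of both loops' assignee values)
def pvAssignees (d : PySem.Dict String String) : List String → Option (List String)
  | [] => some []
  | s :: rest =>
    match d.get? s with
    | none => none
    | some a => (pvAssignees d rest).map (a :: ·)

theorem set_ofList_contains_eq (allSantas : List String) (a : String) :
    (PySem.Set.ofList allSantas).contains a = allSantas.contains a := by
  simp [PySem.Set.mem_ofList]

theorem pvALoop_eq (allSantas : List String) (d : PySem.Dict String String) :
    ∀ (rest : List String) (covered : PySem.Set String),
      pvALoop allSantas d covered rest =
        match pvAssignees d rest with
        | none => false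
        | some assignees =>
          ((rest.zip assignees).all
              (fun p => p.2 != p.1 && (PySem.Set.ofList allSantas).contains p.2))
            && ((PySem.Set.update covered assignees).length == allSantas.length)
  | [], covered => by
    simp [pvALoop, pvAssignees, PySem.Set.update]
  | s :: rest, covered => by
    simp only [pvALoop, pvAssignees]
    cases hd : d.get? s with
    | none => rfl
    | some a =>
      simp only
      by_cases h : (a == s || !(allSantas.contains a)) = true
      · rw [if_pos h]
        cases hrec : pvAssignees d rest with
        | none => rfl
        | some assignees =>
          simp only [Option.map_some, List.zip_cons_cons, List.all_cons,
            set_ofList_contains_eq]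
          have hhead : (a != s && allSantas.contains a) = false := by
            rcases Bool.or_eq_true_iff.mp h with h1 | h1
            · simp only [bne, h1, Bool.not_true, Bool.false_and]
            · have h2 : allSantas.contains a = false := by simpa using h1
              simp only [h2, Bool.and_false]
          simp only [hhead, Bool.false_and]
      · rw [if_neg h]
        rw [pvALoop_eq allSantas d rest (PySem.Set.add covered a)]
        cases hrec : pvAssignees d rest with
        | none => rfl
        | some assignees =>
          simp only [Option.map_some, List.zip_cons_cons, List.all_cons,
            set_ofList_contains_eq]
          have h' : (a == s || !(allSantas.contains a)) = false :=
            Bool.eq_false_iff.mpr h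
          rcases Bool.or_eq_false_iff.mp h' with ⟨h1, h2⟩
          have h3 : allSantas.contains a = true := by simpa using h2
          have h4 : (a != s) = true := by simp [bne, h1]
          simp only [h3, h4, Bool.true_and, PySem.Set.update_cons]

theorem pvBGuard_eq (d : PySem.Dict String String) :
    ∀ (l : List String),
      pvBGuard d l =
        match pvAssignees d l with
        | none => false
        | some assignees => (l.zip assignees).all (fun p => p.2 != p.1)
  | [] => by simp [pvBGuard, pvAssignees]
  | s :: l => by
    simp only [pvBGuard, pvAssignees]
    cases hd : d.get? s with
    | none => rfl
    | some a =>
      simp only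
      rw [pvBGuard_eq d l]
      cases hrec : pvAssignees d l with
      | none => simp
      | some assignees =>
        simp only [Option.map_some, List.zip_cons_cons, List.all_cons]
        by_cases h : (a == s) = true
        · have : (a != s) = false := by simp [bne, h]
          simp [h, this]
        · have hb : (a == s) = false := Bool.eq_false_iff.mpr h
          have : (a != s) = true := by simp [bne, hb]
          simp [h, this]

theorem pvAssignees_map (d : PySem.Dict String String) :
    ∀ (l : List String) (assignees : List String),
      pvAssignees d l = some assignees →
      l.map (fun s => (d.get? s).getD "") = assignees
  | [], assignees => by
    intro h
    simp only [pvAssignees, Option.some.injEq] at h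
    simp [h.symm]
  | s :: l, assignees => by
    simp only [pvAssignees, List.map_cons]
    cases hd : d.get? s with
    | none => simp
    | some a =>
      simp only [Option.getD_some]
      cases hrec : pvAssignees d l with
      | none => simp
      | some as' =>
        intro h
        have := pvAssignees_map d l as' hrec
        simp only [Option.map_some, Option.some.injEq] at h
        rw [this, ← h]


-- the multiset heart: for an assignee list of the right length, "every assignee is a santa and
-- there are n distinct assignees" is exactly "sorted(assignees) == sorted(set(santas))"
theorem core_multiset (as santas : List String) (hlen : as.length = santas.length) :
    ((as.all (fun a => santas.contains a)) && ((PySem.Set.ofList as).length == santas.length))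
      = (PySem.List.sorted as (fun x => x) false
          == PySem.List.sorted (PySem.Set.ofList santas) (fun x => x) false) := by
  rw [Bool.eq_iff_iff]
  simp only [Bool.and_eq_true, List.all_eq_true, List.contains_iff_mem, beq_iff_eq,
    PySem.List.sorted_id_eq_sorted_id_iff_perm]
  constructor
  · rintro ⟨hsub, hcard⟩
    have hTeq : (PySem.Set.ofList as).toFinset = as.toFinset := by
      ext x; simp [PySem.Set.mem_ofList]
    have hcardT : as.toFinset.card = as.length := by
      have h2 : (PySem.Set.ofList as).toFinset.card = (PySem.Set.ofList as).length :=
        List.toFinset_card_of_nodup (PySem.Set.nodup_ofList as)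
      rw [← hTeq, h2, hcard, hlen]
    have hnodup_as : as.Nodup := by
      have hct := List.card_toFinset as
      have hsl : List.Sublist as.dedup as := List.dedup_sublist as
      have hdl : as.dedup.length = as.length := by omega
      exact List.dedup_eq_self.mp (hsl.eq_of_length hdl)
    have hsubF : as.toFinset ⊆ santas.toFinset := by
      intro x hx
      simp only [List.mem_toFinset] at hx ⊢
      exact hsub x hx
    have hcardF : santas.toFinset.card ≤ as.toFinset.card := by
      have h2 : santas.toFinset.card ≤ santas.length := List.toFinset_card_le santas
      omega
    have hFeq : as.toFinset = santas.toFinset := Finset.eq_of_subset_of_card_le hsubF hcardF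
    rw [List.perm_ext_iff_of_nodup hnodup_as (PySem.Set.nodup_ofList santas)]
    intro x
    simp only [PySem.Set.mem_ofList]
    constructor
    · intro hx; exact hsub x hx
    · intro hx
      have hx' : x ∈ santas.toFinset := List.mem_toFinset.mpr hx
      rw [← hFeq] at hx'
      exact List.mem_toFinset.mp hx' 
  · intro hperm
    have hnodup_as : as.Nodup := hperm.symm.nodup (PySem.Set.nodup_ofList santas)
    refine ⟨?_, ?_⟩
    · intro a ha
      exact (PySem.Set.mem_ofList santas a).mp (hperm.mem_iff.mp ha)
    · rw [PySem.Set.ofList_eq_self_of_nodup as hnodup_as, hlen]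

-- an all over a fused predicate on zipped pairs splits into two independent alls
theorem all_and_snd {α β : Type} (zl : List (α × β)) (f : α × β → Bool) (g : β → Bool) :
    zl.all (fun p => f p && g p.2) = (zl.all f && (zl.map Prod.snd).all g) := by
  induction zl with
  | nil => rfl
  | cons p t ih =>
    simp only [List.all_cons, List.map_cons, ih]
    cases f p <;> cases g p.2 <;> simp

-- ===== VERDICT (by name: the statement is the Claim_ definition above) =====
theorem is_assignee_unique_and_not_themselves_in_pairs_spec : Claim_equal_is_assignee_unique_and_not_themselves_in_pairs := by
  intro santas pairs _
  unfold Spec_is_assignee_unique_and_not_themselves_in_pairs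
  unfold is_assignee_unique_and_not_themselves_in_pairs is_assignee_unique_and_not_themselves_in_pairs_alt
  simp only
  by_cases hlen : (santas.length != (PySem.Dict.ofList pairs).size) = true
  · simp [hlen]
  · rw [if_neg hlen, if_neg hlen]
    set d := PySem.Dict.ofList pairs with hd
    rw [pvALoop_eq, pvBGuard_eq]
    cases h : pvAssignees d santas with
    | none => simp
    | some assignees =>
      simp only
      have hmap := pvAssignees_map d santas assignees h
      have hlen2 : assignees.length = santas.length := by
        rw [← hmap, List.length_map]
      have hzipmap : (santas.zip assignees).map Prod.snd = assignees :=
        List.map_snd_zip (le_of_eq hlen2)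
      show ((santas.zip assignees).all
              (fun p => p.2 != p.1 && (PySem.Set.ofList santas).contains p.2)
            && ((PySem.Set.update PySem.Set.empty assignees).length == santas.length))
          = (if (!((santas.zip assignees).all (fun p => p.2 != p.1))) = true then false
             else (PySem.List.sorted (santas.map (fun s => (d.get? s).getD "")) (fun x => x) false
                    == PySem.List.sorted (PySem.Set.ofList santas) (fun x => x) false))
      have hupd : PySem.Set.update PySem.Set.empty assignees = PySem.Set.ofList assignees := by
        rfl
      have hfused :
          (santas.zip assignees).all
              (fun p => p.2 != p.1 && (PySem.Set.ofList santas).contains p.2)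
            = ((santas.zip assignees).all (fun p => p.2 != p.1)
                && assignees.all (fun a => santas.contains a)) := by
        have hfun : (fun p : String × String =>
            p.2 != p.1 && (PySem.Set.ofList santas).contains p.2)
            = fun p => p.2 != p.1 && santas.contains p.2 := by
          funext p; rw [set_ofList_contains_eq]
        rw [hfun, all_and_snd (santas.zip assignees) (fun p => p.2 != p.1)
              (fun a => santas.contains a), hzipmap]
      rw [hfused, hupd, hmap]
      by_cases hg : ((santas.zip assignees).all (fun p => p.2 != p.1)) = true
      · rw [hg]
        simp only [Bool.true_and, Bool.not_true, Bool.false_eq_true, if_false]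
        exact core_multiset assignees santas hlen2
      · have hg' := Bool.eq_false_iff.mpr hg
        rw [hg']
        simp
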